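-- pv_equiv track=rewrite | github.com/Fanusaez/TDA-G04 | TP2-PD/tp2.py | obtener_matriz_optima
-- ===== SOURCE A (Python) =====
-- def obtener_columna(matriz, columna):
--     return [fila[columna] for fila in matriz]
--
-- def obtener_matriz_optima(energia_demandada, energia_disponible):
--     matriz_optima = [[0 for _ in range(len(energia_demandada))] for _ in range(len(energia_disponible))]
--     matriz_optima[0][0] = min(energia_demandada[0], energia_disponible[0])
--     matriz_optima[1][1] = min(energia_demandada[1], energia_disponible[0])
--     for i in range(1, len(matriz_optima[0])):
--         matriz_optima[0][i] = matriz_optima[0][i - 1] + min(energia_demandada[i], energia_disponible[i])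
--     for j in range(2, len(matriz_optima)):
--         for i in range(1, j + 1):
--             if i == 1:
--                 matriz_optima[i][j] = min(energia_disponible[i - 1], energia_demandada[j]) + max(
--                     obtener_columna(matriz_optima, j - 2))
--             else:
--                 matriz_optima[i][j] = min(energia_disponible[i - 1], energia_demandada[j]) + matriz_optima[i - 1][j - 1]
--     return matriz_optima
-- ===== SOURCE B (Python) =====
-- def obtener_matriz_optima(energia_demandada, energia_disponible):
--     # Sparse anti... diagonal fill: cells on a diagonal share the recurrence
--     # v[i][j] = v[i-1][j-1] + min(disp[i-1], dem[j]), so we walk each diagonal once,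
--     # seeding it either from the base cell (1,1) or from a maintained table of
--     # column maxima, and store values in a dict keyed by (fila, columna).
--     n = len(energia_demandada)
--     cells = {}
--     acc = 0
--     for j, (d, s) in enumerate(zip(energia_demandada, energia_disponible)):
--         acc += min(d, s)
--         cells[(0, j)] = acc
--     col_max = [max(cells[(0, j)], 0) for j in range(n)]
--
--     def rellenar_diagonal(i, j, v):
--         while j < n:
--             v += min(energia_disponible[i - 1], energia_demandada[j])
--             cells[(i, j)] = v
--             col_max[j] = max(col_max[j], v)
--             i += 1
--             j += 1
--
--     v11 = min(energia_demandada[1], energia_disponible[0])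
--     cells[(1, 1)] = v11
--     col_max[1] = max(col_max[1], v11)
--     rellenar_diagonal(2, 2, v11)
--     for j0 in range(2, n):
--         rellenar_diagonal(1, j0, col_max[j0 - 2])
--     return [[cells.get((i, j), 0) for j in range(n)] for i in range(n)]
-- ===== Notes on version B (the rewrite author's own statement) =====
-- stated objective: alternative
-- what changed: B abandons A's row-by-row matrix mutation with per-cell column rescans: it walks each anti-diagonal of the recurrence exactly once carrying the running value (v += min term), seeds each diagonal from the base cell or from a maintained column-maximum table (so obtener_columna's scan disappears), stores values sparsely in a dict keyed by (row, col), and materialises the dense matrix only at the end.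
import Mathlib
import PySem

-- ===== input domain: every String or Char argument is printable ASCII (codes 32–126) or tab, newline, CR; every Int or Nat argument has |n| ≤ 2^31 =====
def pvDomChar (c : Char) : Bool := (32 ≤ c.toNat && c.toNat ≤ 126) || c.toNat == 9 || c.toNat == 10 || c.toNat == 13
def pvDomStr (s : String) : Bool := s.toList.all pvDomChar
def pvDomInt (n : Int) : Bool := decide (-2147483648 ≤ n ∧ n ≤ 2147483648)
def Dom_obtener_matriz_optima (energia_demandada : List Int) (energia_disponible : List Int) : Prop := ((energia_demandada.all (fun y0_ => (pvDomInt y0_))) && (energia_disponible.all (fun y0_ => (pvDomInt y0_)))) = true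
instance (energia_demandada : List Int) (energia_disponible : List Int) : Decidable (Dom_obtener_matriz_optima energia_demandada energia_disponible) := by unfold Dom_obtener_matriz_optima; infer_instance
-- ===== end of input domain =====

-- B replaces A's row-major in-place DP (which rescans a whole column with obtener_columna for
-- every row-1 cell) by a sparse anti-diagonal walk: each diagonal of the recurrence is filled
-- once carrying a running value, seeded from a maintained column-maximum table, values kept in
-- a dict and the dense matrix materialised at the end (objective: alternative).

-- ===== PORT A =====
-- All Python indices reached under Pre_ are nonnegative and in range, so List.getD is exact there.
def pyget (xs : List Int) (i : Nat) : Int := xs.getD i 0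

def mget (m : List (List Int)) (i j : Nat) : Int := (m.getD i []).getD j 0

def mset (m : List (List Int)) (i j : Nat) (v : Int) : List (List Int) :=
  m.set i ((m.getD i []).set j v)

-- Python max over a nonempty list (left fold); every list it is applied to under Pre_ is nonempty.
def pymax : List Int → Int
  | [] => 0
  | x :: xs => xs.foldl max x

def obtener_columna (matriz : List (List Int)) (columna : Nat) : List Int :=
  matriz.map (fun fila => fila.getD columna 0)

def obtener_matriz_optima (energia_demandada : List Int) (energia_disponible : List Int) : List (List Int) :=
  let m0 := List.replicate energia_disponible.length (List.replicate energia_demandada.length (0:Int))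
  let m1 := mset m0 0 0 (min (pyget energia_demandada 0) (pyget energia_disponible 0))
  let m2 := mset m1 1 1 (min (pyget energia_demandada 1) (pyget energia_disponible 0))
  let m3 := (List.range' 1 ((m2.getD 0 []).length - 1)).foldl
      (fun m i => mset m 0 i (mget m 0 (i-1) + min (pyget energia_demandada i) (pyget energia_disponible i))) m2
  (List.range' 2 (m3.length - 2)).foldl
      (fun m j => (List.range' 1 j).foldl
        (fun m i => if i = 1 then
            mset m i j (min (pyget energia_disponible (i-1)) (pyget energia_demandada j) + pymax (obtener_columna m (j-2)))
          else
            mset m i j (min (pyget energia_disponible (i-1)) (pyget energia_demandada j) + mget m (i-1) (j-1))) m) m3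

-- ===== PORT B =====
-- rellenar_diagonal: the while-loop walking one diagonal, as recursion on n - j.
def pvDiagFill (ed eD : List Int) (n : Nat) (i j : Nat) (v : Int)
    (cells : PySem.Dict (Nat × Nat) Int) (colMax : List Int) :
    PySem.Dict (Nat × Nat) Int × List Int :=
  if h : j < n then
    let v' := v + min (pyget eD (i-1)) (pyget ed j)
    pvDiagFill ed eD n (i+1) (j+1) v' (cells.insert (i, j) v')
      (colMax.set j (max (colMax.getD j 0) v'))
  else (cells, colMax)
  termination_by n - j

def obtener_matriz_optima_alt (energia_demandada : List Int) (energia_disponible : List Int) : List (List Int) :=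
  let n := energia_demandada.length
  -- enumerate(zip(ed, eD)) with the running prefix sum acc; indices are 0..n-1, Nat is exact here
  let st0 := ((energia_demandada.zip energia_disponible).zipIdx).foldl
      (fun (p : PySem.Dict (Nat × Nat) Int × Int) x =>
        let acc := p.2 + min x.1.1 x.1.2
        (p.1.insert (0, x.2) acc, acc))
      (PySem.Dict.empty, 0)
  let cells0 := st0.1
  -- keys (0, j) are always present, so getD is exact for cells[(0, j)]
  let colMax0 := (List.range n).map (fun j => max (cells0.getD (0, j) 0) 0)
  let v11 := min (pyget energia_demandada 1) (pyget energia_disponible 0)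
  let cells1 := cells0.insert (1, 1) v11
  let colMax1 := colMax0.set 1 (max (colMax0.getD 1 0) v11)
  let st1 := pvDiagFill energia_demandada energia_disponible n 2 2 v11 cells1 colMax1
  let st2 := (List.range' 2 (n - 2)).foldl
      (fun (st : PySem.Dict (Nat × Nat) Int × List Int) j0 =>
        pvDiagFill energia_demandada energia_disponible n 1 j0 (st.2.getD (j0 - 2) 0) st.1 st.2)
      st1
  (List.range n).map (fun i => (List.range n).map (fun j => st2.1.getD (i, j) 0))

-- ===== PRECONDITION & SPEC =====
-- Pre_: exactly the inputs on which A returns (otherwise A raises IndexError):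
-- the two lists must have equal length ≥ 2 (rows reach [1][1]; the first-row loop reads
-- energia_disponible up to index n-1, the column loop reads column indices up to m-1).
def Pre_obtener_matriz_optima (energia_demandada : List Int) (energia_disponible : List Int) : Prop :=
  energia_demandada.length = energia_disponible.length ∧ 2 ≤ energia_demandada.length
instance (energia_demandada : List Int) (energia_disponible : List Int) : Decidable (Pre_obtener_matriz_optima energia_demandada energia_disponible) := by unfold Pre_obtener_matriz_optima; infer_instance
def pvWitness_obtener_matriz_optima : List Int × List Int := ([3, 1, 4], [2, 2, 2])

def Spec_obtener_matriz_optima (energia_demandada : List Int) (energia_disponible : List Int) (out : List (List Int)) : Prop := out = obtener_matriz_optima_alt energia_demandada energia_disponible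
instance (energia_demandada : List Int) (energia_disponible : List Int) (out : List (List Int)) : Decidable (Spec_obtener_matriz_optima energia_demandada energia_disponible out) := by unfold Spec_obtener_matriz_optima; infer_instance

-- ===== CLAIM (what is proved, stated in full; the proofs are below) =====
def Claim_equal_obtener_matriz_optima : Prop := ∀ (energia_demandada : List Int) (energia_disponible : List Int), Dom_obtener_matriz_optima energia_demandada energia_disponible → Pre_obtener_matriz_optima energia_demandada energia_disponible → Spec_obtener_matriz_optima energia_demandada energia_disponible (obtener_matriz_optima energia_demandada energia_disponible)

-- ===== LEMMAS AND PROOFS =====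

-- Row-0 prefix sums of min(demand, supply).
def r0v (ed eD : List Int) : Nat → Int
  | 0 => min (pyget ed 0) (pyget eD 0)
  | j+1 => r0v ed eD j + min (pyget ed (j+1)) (pyget eD (j+1))

-- Column j of the final matrix (padded with zeros to length n).
def colS (ed eD : List Int) (n : Nat) : Nat → List Int
  | 0 => r0v ed eD 0 :: List.replicate (n-1) 0
  | 1 => r0v ed eD 1 :: min (pyget ed 1) (pyget eD 0) :: List.replicate (n-2) 0
  | (j+2) =>
    (r0v ed eD (j+2) :: (min (pyget eD 0) (pyget ed (j+2)) + pymax (colS ed eD n j)) ::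
      (List.range' 2 (j+1)).map (fun i => min (pyget eD (i-1)) (pyget ed (j+2)) + pyget (colS ed eD n (j+1)) (i-1)))
    ++ List.replicate (n - (j+3)) 0

def matOf (n : Nat) (g : Nat → Nat → Int) : List (List Int) :=
  (List.range n).map (fun i => (List.range n).map (g i))

-- A's matrix after the two base-cell writes and the first k steps of the first-row loop.
def entRow (ed eD : List Int) (k i j : Nat) : Int :=
  if i = 0 ∧ j ≤ k then r0v ed eD j
  else if i = 1 ∧ j = 1 then min (pyget ed 1) (pyget eD 0) else 0

-- A's matrix after the outer loop has processed columns 2..J.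
def entA (ed eD : List Int) (n J i j : Nat) : Int :=
  if j ≤ J then (colS ed eD n j).getD i 0
  else if i = 0 then r0v ed eD j else 0

-- A's matrix inside the inner loop at column J, after rows 1..t of column J are written.
def entI (ed eD : List Int) (n J t i j' : Nat) : Int :=
  if j' = J ∧ 1 ≤ i ∧ i ≤ t then (colS ed eD n J).getD i 0 else entA ed eD n (J-1) i j'

-- ---- generic list lemmas ----

theorem getD_map_range {α : Type} (f : Nat → α) (n i : Nat) (d : α) :
    ((List.range n).map f).getD i d = if i < n then f i else d := by
  by_cases h : i < n
  · simp [List.getD_eq_getElem?_getD, h]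
  · simp [List.getD_eq_getElem?_getD, h]

theorem getD_map_range' {α : Type} (f : Nat → α) (s m i : Nat) (d : α) :
    ((List.range' s m).map f).getD i d = if i < m then f (s + i) else d := by
  by_cases h : i < m
  · simp [List.getD_eq_getElem?_getD, h]
  · simp [List.getD_eq_getElem?_getD, h]

theorem getD_replicate_zero (m i : Nat) : (List.replicate m (0:Int)).getD i 0 = 0 := by
  by_cases h : i < m
  · simp [List.getD_eq_getElem?_getD, h]
  · simp [List.getD_eq_getElem?_getD, h]

theorem getD_set_int (l : List Int) (j : Nat) (x : Int) (c : Nat) :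
    (l.set j x).getD c 0 = if c = j ∧ j < l.length then x else l.getD c 0 := by
  by_cases h : c = j ∧ j < l.length
  · simp [List.getD_eq_getElem?_getD, h.1, h.2]
  · rw [if_neg h]
    by_cases hcj : c = j
    · subst hcj
      have : ¬ c < l.length := by omega
      simp [List.getD_eq_getElem?_getD, List.getElem?_set, this]
    · have hjc : j ≠ c := fun h => hcj h.symm
      simp [List.getD_eq_getElem?_getD, List.getElem?_set, hjc]

theorem map_range_set {α : Type} (f : Nat → α) (n i : Nat) (x : α) (h : i < n) :
    ((List.range n).map f).set i x = (List.range n).map (fun k => if k = i then x else f k) := by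
  apply List.ext_getElem
  · simp
  · intro k hk hk'
    simp only [List.getElem_set, List.getElem_map, List.getElem_range]
    simp only [List.length_set, List.length_map, List.length_range] at hk
    by_cases hki : k = i
    · subst hki; simp
    · have hik : i ≠ k := fun h' => hki h'.symm
      simp [hki, hik]

theorem matCongr (n : Nat) (g g' : Nat → Nat → Int)
    (h : ∀ i, i < n → ∀ j, j < n → g i j = g' i j) :
    matOf n g = matOf n g' := by
  unfold matOf
  refine List.map_congr_left ?_
  intro i hi
  refine List.map_congr_left ?_
  intro j hj
  exact h i (List.mem_range.mp hi) j (List.mem_range.mp hj)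

theorem matOf_getD (n : Nat) (g : Nat → Nat → Int) (i : Nat) (hi : i < n) :
    (matOf n g).getD i [] = (List.range n).map (g i) := by
  unfold matOf
  rw [getD_map_range]
  simp [hi]

theorem matOf_length (n : Nat) (g : Nat → Nat → Int) : (matOf n g).length = n := by
  simp [matOf]

theorem mget_matOf (n : Nat) (g : Nat → Nat → Int) (i j : Nat) (hi : i < n) (hj : j < n) :
    mget (matOf n g) i j = g i j := by
  unfold mget
  rw [matOf_getD n g i hi, getD_map_range]
  simp [hj]

theorem mset_matOf (n : Nat) (g : Nat → Nat → Int) (i j : Nat) (v : Int) (hi : i < n) (hj : j < n) :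
    mset (matOf n g) i j v = matOf n (fun i' j' => if i' = i ∧ j' = j then v else g i' j') := by
  unfold mset
  rw [matOf_getD n g i hi, map_range_set _ n j v hj]
  unfold matOf
  rw [map_range_set _ n i _ hi]
  refine List.map_congr_left ?_
  intro k hk
  by_cases hki : k = i
  · subst hki
    rw [if_pos (rfl : k = k)]
    refine List.map_congr_left ?_
    intro j' _
    by_cases hj' : j' = j <;> simp [hj']
  · simp only [if_neg hki]
    refine List.map_congr_left ?_
    intro j' _
    simp [hki]

theorem columna_matOf (n : Nat) (g : Nat → Nat → Int) (c : Nat) :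
    obtener_columna (matOf n g) c = (List.range n).map (fun i => ((List.range n).map (g i)).getD c 0) := by
  unfold obtener_columna matOf
  rw [List.map_map]
  rfl

theorem eq_map_range_getD (l : List Int) (n : Nat) (h : l.length = n) :
    (List.range n).map (fun i => l.getD i 0) = l := by
  apply List.ext_getElem
  · simp [h]
  · intro k hk hk'
    simp only [List.getElem_map, List.getElem_range]
    rw [List.getD_eq_getElem l 0 (by omega)]

-- ---- pymax facts ----

theorem le_foldl_max_init (xs : List Int) (a : Int) : a ≤ xs.foldl max a := by
  induction xs generalizing a with
  | nil => exact le_refl a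
  | cons x t ih => exact le_trans (le_max_left a x) (ih _)

theorem mem_le_foldl_max (xs : List Int) (a : Int) : ∀ b, a ∈ xs → a ≤ xs.foldl max b := by
  induction xs with
  | nil => intro b h; cases h
  | cons x t ih =>
    intro b h
    rcases List.mem_cons.mp h with rfl | hm
    · exact le_trans (le_max_right b a) (le_foldl_max_init _ _)
    · exact ih _ hm

theorem foldl_max_le (xs : List Int) (c : Int) : ∀ b, b ≤ c → (∀ a ∈ xs, a ≤ c) → xs.foldl max b ≤ c := by
  induction xs with
  | nil => intro b hb _; exact hb
  | cons x t ih =>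
    intro b hb h
    exact ih _ (max_le hb (h x List.mem_cons_self)) (fun a ha => h a (List.mem_cons_of_mem _ ha))

theorem mem_le_pymax (l : List Int) (a : Int) (h : a ∈ l) : a ≤ pymax l := by
  cases l with
  | nil => cases h
  | cons x xs =>
    rcases List.mem_cons.mp h with rfl | hm
    · exact le_foldl_max_init _ _
    · exact mem_le_foldl_max _ _ _ hm

theorem pymax_le_of_forall (l : List Int) (c : Int) (hne : l ≠ []) (h : ∀ a ∈ l, a ≤ c) :
    pymax l ≤ c := by
  cases l with
  | nil => exact absurd rfl hne
  | cons x xs =>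
    exact foldl_max_le _ _ _ (h x List.mem_cons_self) (fun a ha => h a (List.mem_cons_of_mem _ ha))

theorem getD_le_pymax (l : List Int) (m : Nat) (hm : m < l.length) : l.getD m 0 ≤ pymax l := by
  apply mem_le_pymax
  rw [List.getD_eq_getElem l 0 hm]
  exact List.getElem_mem hm

-- ---- colS facts ----

theorem colS_length (ed eD : List Int) (n j : Nat) (hj : j < n) (hn : 2 ≤ n) :
    (colS ed eD n j).length = n := by
  match j with
  | 0 => simp [colS]; omega
  | 1 => simp [colS]; omega
  | (k+2) => simp [colS]; omega

theorem colS_getD_zero (ed eD : List Int) (n j : Nat) :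
    (colS ed eD n j).getD 0 0 = r0v ed eD j := by
  match j with
  | 0 => rfl
  | 1 => rfl
  | (k+2) => rfl

theorem colS_getD_one_base (ed eD : List Int) (n : Nat) :
    (colS ed eD n 1).getD 1 0 = min (pyget ed 1) (pyget eD 0) := rfl

theorem colS_getD_one (ed eD : List Int) (n k : Nat) :
    (colS ed eD n (k+2)).getD 1 0 = min (pyget eD 0) (pyget ed (k+2)) + pymax (colS ed eD n k) := rfl

theorem colS_getD_mid (ed eD : List Int) (n i k : Nat) (h2 : 2 ≤ i) (hik : i ≤ k+2) :
    (colS ed eD n (k+2)).getD i 0 =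
      min (pyget eD (i-1)) (pyget ed (k+2)) + pyget (colS ed eD n (k+1)) (i-1) := by
  obtain ⟨t, rfl⟩ : ∃ t, i = t + 2 := ⟨i - 2, by omega⟩
  show ((_ :: _ :: (List.range' 2 (k+1)).map _) ++ _).getD (t+2) 0 = _
  rw [List.cons_append, List.cons_append, List.getD_cons_succ, List.getD_cons_succ,
      List.getD_append _ _ _ _ (by simp; omega), getD_map_range']
  rw [if_pos (show t < k+1 by omega), show 2 + t - 1 = t + 2 - 1 by omega]

theorem colS_getD_big (ed eD : List Int) (n i j : Nat) (hj : j < i) :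
    (colS ed eD n j).getD i 0 = 0 := by
  match j with
  | 0 =>
    obtain ⟨t, rfl⟩ : ∃ t, i = t + 1 := ⟨i - 1, by omega⟩
    show (_ :: List.replicate (n-1) (0:Int)).getD (t+1) 0 = 0
    rw [List.getD_cons_succ]; exact getD_replicate_zero _ _
  | 1 =>
    obtain ⟨t, rfl⟩ : ∃ t, i = t + 2 := ⟨i - 2, by omega⟩
    show (_ :: _ :: List.replicate (n-2) (0:Int)).getD (t+2) 0 = 0
    rw [List.getD_cons_succ, List.getD_cons_succ]; exact getD_replicate_zero _ _
  | (k+2) =>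
    obtain ⟨t, rfl⟩ : ∃ t, i = t + 2 := ⟨i - 2, by omega⟩
    show ((_ :: _ :: (List.range' 2 (k+1)).map _) ++ _).getD (t+2) 0 = 0
    rw [List.cons_append, List.cons_append, List.getD_cons_succ, List.getD_cons_succ,
        List.getD_append_right _ _ _ _ (by simp; omega)]
    simp only [List.length_map, List.length_range']
    exact getD_replicate_zero _ _

-- ---- B side ----

-- running prefix of min over the zipped list
def zr (l : List (Int × Int)) : Nat → Int
  | 0 => min (l.getD 0 (0,0)).1 (l.getD 0 (0,0)).2
  | m+1 => zr l m + min (l.getD (m+1) (0,0)).1 (l.getD (m+1) (0,0)).2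

theorem zr_cons (p : Int × Int) (t : List (Int × Int)) (m : Nat) :
    zr (p :: t) (m+1) = min p.1 p.2 + zr t m := by
  induction m with
  | zero => simp [zr]
  | succ q ih =>
    have h1 : zr (p :: t) (q + 1 + 1) = zr (p :: t) (q + 1) +
        min ((p :: t).getD (q + 1 + 1) (0,0)).1 ((p :: t).getD (q + 1 + 1) (0,0)).2 := rfl
    have h2 : zr t (q + 1) = zr t q +
        min ((t.getD (q + 1) (0,0))).1 ((t.getD (q + 1) (0,0))).2 := rfl
    rw [h1, ih, h2, List.getD_cons_succ]
    ring

theorem zr_eq_r0v (ed eD : List Int) (h : ed.length = eD.length) (j : Nat) (hj : j < ed.length) :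
    zr (ed.zip eD) j = r0v ed eD j := by
  induction j with
  | zero =>
    have h0 : (ed.zip eD).getD 0 (0,0) = (pyget ed 0, pyget eD 0) := by
      rw [List.getD_eq_getElem _ _ (by simp [List.length_zip]; omega), List.getElem_zip]
      unfold pyget
      rw [List.getD_eq_getElem _ _ (by omega), List.getD_eq_getElem _ _ (by omega)]
    show min ((ed.zip eD).getD 0 (0,0)).1 ((ed.zip eD).getD 0 (0,0)).2 = r0v ed eD 0
    rw [h0]
    rfl
  | succ q ih =>
    have hq : (ed.zip eD).getD (q+1) (0,0) = (pyget ed (q+1), pyget eD (q+1)) := by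
      rw [List.getD_eq_getElem _ _ (by simp [List.length_zip]; omega), List.getElem_zip]
      unfold pyget
      rw [List.getD_eq_getElem _ _ (by omega), List.getD_eq_getElem _ _ (by omega)]
    show zr (ed.zip eD) q +
        min ((ed.zip eD).getD (q+1) (0,0)).1 ((ed.zip eD).getD (q+1) (0,0)).2 = r0v ed eD (q+1)
    rw [hq, ih (by omega)]
    rfl

theorem row0_fold (l : List (Int × Int)) (k : Nat) (d : PySem.Dict (Nat × Nat) Int) (a : Int)
    (i j : Nat) :
    ((l.zipIdx k).foldl
      (fun (p : PySem.Dict (Nat × Nat) Int × Int) x =>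
        (p.1.insert (0, x.2) (p.2 + min x.1.1 x.1.2), p.2 + min x.1.1 x.1.2))
      (d, a)).1.getD (i, j) 0 =
    if i = 0 ∧ k ≤ j ∧ j < k + l.length then a + zr l (j - k) else d.getD (i, j) 0 := by
  induction l generalizing k d a with
  | nil => simp
  | cons p t ih =>
    have hz : (p :: t).zipIdx k = (p, k) :: t.zipIdx (k+1) := by simp [List.zipIdx]
    rw [hz]
    simp only [List.foldl_cons]
    rw [ih]
    by_cases hr : i = 0 ∧ k + 1 ≤ j ∧ j < k + 1 + t.length
    · rw [if_pos hr,
          if_pos (show i = 0 ∧ k ≤ j ∧ j < k + (p :: t).length from by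
            simp only [List.length_cons]; omega)]
      obtain ⟨t', ht'⟩ : ∃ t', j - k = t' + 1 := ⟨j - k - 1, by omega⟩
      rw [ht', zr_cons, show j - (k+1) = t' from by omega]
      ring
    · rw [if_neg hr, PySem.Dict.getD_insert]
      by_cases he : (i, j) = ((0:Nat), k)
      · rw [if_pos he]
        have hik : i = 0 ∧ j = k :=
          ⟨congrArg Prod.fst he, congrArg Prod.snd he⟩
        rw [if_pos (show i = 0 ∧ k ≤ j ∧ j < k + (p :: t).length from by
            simp only [List.length_cons]; omega)]
        rw [hik.2, Nat.sub_self]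
        simp [zr]
      · rw [if_neg he, if_neg]
        intro hc
        obtain ⟨hi0, hkj, hjlt⟩ := hc
        simp only [List.length_cons] at hjlt
        by_cases hjk : j = k
        · exact he (by rw [hi0, hjk])
        · exact hr ⟨hi0, by omega, by omega⟩

-- the value col_max[c] must exceed: every written entry of column c after stage k
def CMInv (ed eD : List Int) (n k : Nat) (cm : List Int) : Prop :=
  cm.length = n ∧
  (∀ c, c < n → max (r0v ed eD c) 0 ≤ cm.getD c 0) ∧
  (∀ c, c < n → ∀ i, 1 ≤ i → i ≤ c → (i = c ∨ c ≤ i + k) → (colS ed eD n c).getD i 0 ≤ cm.getD c 0) ∧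
  (∀ c, c + 3 ≤ n → cm.getD c 0 ≤ pymax (colS ed eD n c))

theorem cm_read (ed eD : List Int) (n k : Nat) (cm : List Int) (hn : 2 ≤ n)
    (inv : CMInv ed eD n k cm) (c : Nat) (hc : c + 3 ≤ n) (hck : c ≤ k) :
    cm.getD c 0 = pymax (colS ed eD n c) := by
  obtain ⟨hlen, hseed, hent, hub⟩ := inv
  apply le_antisymm (hub c hc)
  apply pymax_le_of_forall
  · have := colS_length ed eD n c (by omega) hn
    intro h; rw [h] at this; simp at this; omega
  · intro a ha
    obtain ⟨m, hm, rfl⟩ := List.mem_iff_getElem.mp ha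
    rw [← List.getD_eq_getElem _ 0 hm]
    rw [colS_length ed eD n c (by omega) hn] at hm
    rcases Nat.lt_or_ge m (c+1) with hmc | hmc
    · match m with
      | 0 =>
        rw [colS_getD_zero]
        exact le_trans (le_max_left _ _) (hseed c (by omega))
      | m+1 =>
        exact hent c (by omega) (m+1) (by omega) (by omega) (Or.inr (by omega))
    · rw [colS_getD_big ed eD n m c (by omega)]
      exact le_trans (le_max_right _ _) (hseed c (by omega))

-- one-step unfolding of pvDiagFill
theorem diagFill_step (ed eD : List Int) (n i j : Nat) (v : Int)
    (cells : PySem.Dict (Nat × Nat) Int) (colMax : List Int) (hj : j < n) :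
    pvDiagFill ed eD n i j v cells colMax =
      pvDiagFill ed eD n (i+1) (j+1) (v + min (pyget eD (i-1)) (pyget ed j))
        (cells.insert (i, j) (v + min (pyget eD (i-1)) (pyget ed j)))
        (colMax.set j (max (colMax.getD j 0) (v + min (pyget eD (i-1)) (pyget ed j)))) := by
  rw [pvDiagFill, dif_pos hj]

theorem diagFill_step1 (ed eD : List Int) (n j : Nat) (v : Int)
    (cells : PySem.Dict (Nat × Nat) Int) (colMax : List Int) (hj : j < n) :
    pvDiagFill ed eD n 1 j v cells colMax =
      pvDiagFill ed eD n 2 (j+1) (v + min (pyget eD 0) (pyget ed j))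
        (cells.insert (1, j) (v + min (pyget eD 0) (pyget ed j)))
        (colMax.set j (max (colMax.getD j 0) (v + min (pyget eD 0) (pyget ed j)))) := by
  rw [pvDiagFill, dif_pos hj]

theorem diagFill_stop (ed eD : List Int) (n i j : Nat) (v : Int)
    (cells : PySem.Dict (Nat × Nat) Int) (colMax : List Int) (hj : ¬ j < n) :
    pvDiagFill ed eD n i j v cells colMax = (cells, colMax) := by
  rw [pvDiagFill, dif_neg hj]

-- postcondition of one pvDiagFill run starting at row i0 ≥ 2
theorem diagFill_spec (ed eD : List Int) (n : Nat) (hn : 2 ≤ n) :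
    ∀ (m i0 j0 : Nat), m = n - j0 → 2 ≤ i0 → i0 ≤ j0 →
    ∀ (v : Int), v = (colS ed eD n (j0-1)).getD (i0-1) 0 →
    ∀ (cells : PySem.Dict (Nat × Nat) Int) (colMax : List Int), colMax.length = n →
    (∀ i j, (pvDiagFill ed eD n i0 j0 v cells colMax).1.getD (i, j) 0 =
        if i0 ≤ i ∧ j0 ≤ j ∧ j < n ∧ i - i0 = j - j0 then (colS ed eD n j).getD i 0
        else cells.getD (i, j) 0) ∧
    (pvDiagFill ed eD n i0 j0 v cells colMax).2.length = n ∧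
    (∀ c, (pvDiagFill ed eD n i0 j0 v cells colMax).2.getD c 0 =
        if j0 ≤ c ∧ c < n then max (colMax.getD c 0) ((colS ed eD n c).getD (i0 + (c - j0)) 0)
        else colMax.getD c 0) := by
  intro m
  induction m with
  | zero =>
    intro i0 j0 hm h2 hij v hv cells colMax hlen
    have hj : ¬ j0 < n := by omega
    rw [diagFill_stop ed eD n i0 j0 v cells colMax hj]
    refine ⟨fun i j => ?_, hlen, fun c => ?_⟩
    · rw [if_neg (by omega)]
    · rw [if_neg (by omega)]
  | succ q ih =>
    intro i0 j0 hm h2 hij v hv cells colMax hlen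
    by_cases hj : j0 < n
    · rw [diagFill_step ed eD n i0 j0 v cells colMax hj]
      have hv' : v + min (pyget eD (i0-1)) (pyget ed j0) = (colS ed eD n j0).getD i0 0 := by
        obtain ⟨k, rfl⟩ : ∃ k, j0 = k + 2 := ⟨j0 - 2, by omega⟩
        rw [colS_getD_mid ed eD n i0 k h2 (by omega), hv]
        show _ = min _ _ + (colS ed eD n (k+1)).getD (i0-1) 0
        rw [show k + 2 - 1 = k + 1 from by omega]
        ring
      obtain ⟨hc, hl, hm'⟩ := ih (i0+1) (j0+1) (by omega) (by omega) (by omega)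
        (v + min (pyget eD (i0-1)) (pyget ed j0))
        (by rw [hv']; simp)
        (cells.insert (i0, j0) (v + min (pyget eD (i0-1)) (pyget ed j0)))
        (colMax.set j0 (max (colMax.getD j0 0) (v + min (pyget eD (i0-1)) (pyget ed j0))))
        (by rw [List.length_set]; exact hlen)
      refine ⟨fun i j => ?_, hl, fun c => ?_⟩
      · rw [hc i j]
        by_cases hr : i0 + 1 ≤ i ∧ j0 + 1 ≤ j ∧ j < n ∧ i - (i0+1) = j - (j0+1)
        · rw [if_pos hr, if_pos (show i0 ≤ i ∧ j0 ≤ j ∧ j < n ∧ i - i0 = j - j0 from by omega)]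
        · rw [if_neg hr, PySem.Dict.getD_insert]
          by_cases he : (i, j) = (i0, j0)
          · rw [if_pos he]
            have hik : i = i0 ∧ j = j0 :=
              ⟨congrArg Prod.fst he, congrArg Prod.snd he⟩
            rw [if_pos (show i0 ≤ i ∧ j0 ≤ j ∧ j < n ∧ i - i0 = j - j0 from by omega),
                hik.1, hik.2, hv']
          · rw [if_neg he, if_neg]
            intro hcnd
            by_cases hieq : i = i0
            · have : j = j0 := by omega
              exact he (by rw [hieq, this])
            · exact hr ⟨by omega, by omega, hcnd.2.2.1, by omega⟩
      · rw [hm' c]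
        by_cases hr : j0 + 1 ≤ c ∧ c < n
        · rw [if_pos hr, getD_set_int,
              if_neg (show ¬(c = j0 ∧ j0 < colMax.length) from by omega),
              if_pos (show j0 ≤ c ∧ c < n from by omega),
              show i0 + 1 + (c - (j0 + 1)) = i0 + (c - j0) from by omega]
        · rw [if_neg hr, getD_set_int]
          by_cases hcj : c = j0
          · subst hcj
            rw [if_pos (show c = c ∧ c < colMax.length from ⟨rfl, by omega⟩),
                if_pos (show c ≤ c ∧ c < n from ⟨le_refl c, hj⟩),
                Nat.sub_self, Nat.add_zero, hv']
          · rw [if_neg (show ¬(c = j0 ∧ j0 < colMax.length) from by omega),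
                if_neg (show ¬(j0 ≤ c ∧ c < n) from by omega)]
    · rw [diagFill_stop ed eD n i0 j0 v cells colMax hj]
      refine ⟨fun i j => ?_, hlen, fun c => ?_⟩
      · rw [if_neg (by omega)]
      · rw [if_neg (by omega)]

-- joint invariant after the main diagonal and the first k row-1 diagonals
def BInv (ed eD : List Int) (n k : Nat) (st : PySem.Dict (Nat × Nat) Int × List Int) : Prop :=
  (∀ i j, st.1.getD (i, j) 0 =
      if j < n ∧ (i = 0 ∨ (1 ≤ i ∧ i ≤ j ∧ j ≤ i + k)) then (colS ed eD n j).getD i 0 else 0)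
  ∧ CMInv ed eD n k st.2

theorem binv_step (ed eD : List Int) (n k : Nat) (hn : 2 ≤ n) (hk : 2 + k < n)
    (st : PySem.Dict (Nat × Nat) Int × List Int) (inv : BInv ed eD n k st) :
    BInv ed eD n (k+1)
      (pvDiagFill ed eD n 1 (2+k) (st.2.getD (2+k-2) 0) st.1 st.2) := by
  obtain ⟨hcell, hcm⟩ := inv
  have hlen := hcm.1
  have hread : st.2.getD (2+k-2) 0 = pymax (colS ed eD n k) := by
    rw [show (2+k:Nat)-2 = k from by omega]
    exact cm_read ed eD n k st.2 hn hcm k (by omega) (le_refl k)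
  have hv' : st.2.getD (2+k-2) 0 + min (pyget eD 0) (pyget ed (2+k)) =
      (colS ed eD n (2+k)).getD 1 0 := by
    rw [hread, show (2+k:Nat) = k+2 from by omega, colS_getD_one]
    ring
  rw [diagFill_step1 ed eD n (2+k) (st.2.getD (2+k-2) 0) st.1 st.2 (by omega)]
  obtain ⟨hc, hl, hm'⟩ := diagFill_spec ed eD n hn (n - (2+k+1)) 2 (2+k+1) rfl (le_refl 2)
    (by omega)
    (st.2.getD (2+k-2) 0 + min (pyget eD 0) (pyget ed (2+k)))
    (by rw [show (2+k+1:Nat)-1 = 2+k from by omega, show (2:Nat)-1 = 1 from rfl]; exact hv')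
    (st.1.insert (1, 2+k) (st.2.getD (2+k-2) 0 + min (pyget eD 0) (pyget ed (2+k))))
    (st.2.set (2+k) (max (st.2.getD (2+k) 0) (st.2.getD (2+k-2) 0 + min (pyget eD 0) (pyget ed (2+k)))))
    (by rw [List.length_set]; exact hlen)
  have hM : ∀ c, (pvDiagFill ed eD n 2 (2+k+1)
      (st.2.getD (2+k-2) 0 + min (pyget eD 0) (pyget ed (2+k)))
      (st.1.insert (1, 2+k) (st.2.getD (2+k-2) 0 + min (pyget eD 0) (pyget ed (2+k))))
      (st.2.set (2+k) (max (st.2.getD (2+k) 0) (st.2.getD (2+k-2) 0 + min (pyget eD 0) (pyget ed (2+k)))))).2.getD c 0 =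
      if 2 + k ≤ c ∧ c < n then max (st.2.getD c 0) ((colS ed eD n c).getD (c - (2+k) + 1) 0)
      else st.2.getD c 0 := by
    intro c
    rw [hm' c]
    by_cases hr : 2 + k + 1 ≤ c ∧ c < n
    · rw [if_pos hr, getD_set_int,
          if_neg (show ¬(c = 2+k ∧ 2+k < st.2.length) from by omega),
          if_pos (show 2+k ≤ c ∧ c < n from by omega),
          show 2 + (c - (2+k+1)) = c - (2+k) + 1 from by omega]
    · rw [if_neg hr, getD_set_int]
      by_cases hcj : c = 2+k
      · subst hcj
        rw [if_pos (show (2+k:Nat) = 2+k ∧ 2+k < st.2.length from ⟨rfl, by omega⟩),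
            if_pos (show (2+k:Nat) ≤ 2+k ∧ 2+k < n from ⟨le_refl _, by omega⟩),
            Nat.sub_self, Nat.zero_add, hv']
      · rw [if_neg (show ¬(c = 2+k ∧ 2+k < st.2.length) from by omega),
            if_neg (show ¬(2+k ≤ c ∧ c < n) from by omega)]
  constructor
  · intro i j
    rw [hc i j]
    by_cases hr : 2 ≤ i ∧ 2 + k + 1 ≤ j ∧ j < n ∧ i - 2 = j - (2+k+1)
    · rw [if_pos hr,
          if_pos (show j < n ∧ (i = 0 ∨ (1 ≤ i ∧ i ≤ j ∧ j ≤ i + (k+1))) from by omega)]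
    · rw [if_neg hr, PySem.Dict.getD_insert]
      by_cases he : (i, j) = ((1:Nat), 2+k)
      · rw [if_pos he]
        have hik : i = 1 ∧ j = 2+k :=
          ⟨congrArg Prod.fst he, congrArg Prod.snd he⟩
        rw [if_pos (show j < n ∧ (i = 0 ∨ (1 ≤ i ∧ i ≤ j ∧ j ≤ i + (k+1))) from by omega),
            hik.1, hik.2]
        exact hv'
      · rw [if_neg he, hcell i j]
        have he' : ¬(i = 1 ∧ j = 2+k) := fun h => he (by rw [h.1, h.2])
        by_cases hold : j < n ∧ (i = 0 ∨ (1 ≤ i ∧ i ≤ j ∧ j ≤ i + k))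
        · rw [if_pos hold,
              if_pos (show j < n ∧ (i = 0 ∨ (1 ≤ i ∧ i ≤ j ∧ j ≤ i + (k+1))) from by omega)]
        · rw [if_neg hold, if_neg]
          intro hnew
          obtain ⟨hjn, hcase⟩ := hnew
          rcases hcase with hi0 | ⟨h1i, hij', hjik⟩
          · exact hold ⟨hjn, Or.inl hi0⟩
          · by_cases hok : j ≤ i + k
            · exact hold ⟨hjn, Or.inr ⟨h1i, hij', hok⟩⟩
            · -- then j = i + (k+1): the new diagonal
              by_cases hi1 : i = 1
              · exact he' ⟨hi1, by omega⟩
              · exact hr ⟨by omega, by omega, hjn, by omega⟩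
  · refine ⟨hl, ?_, ?_, ?_⟩
    · intro c hc'
      rw [hM c]
      by_cases hr : 2 + k ≤ c ∧ c < n
      · rw [if_pos hr]; exact le_trans (hcm.2.1 c hc') (le_max_left _ _)
      · rw [if_neg hr]; exact hcm.2.1 c hc'
    · intro c hc' i h1i hic hcase
      rw [hM c]
      by_cases hr : 2 + k ≤ c ∧ c < n
      · rw [if_pos hr]
        by_cases hold : i = c ∨ c ≤ i + k
        · exact le_trans (hcm.2.2.1 c hc' i h1i hic hold) (le_max_left _ _)
        · have hinew : i = c - (2+k) + 1 := by omega
          rw [hinew]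
          exact le_max_right _ _
      · rw [if_neg hr]
        refine hcm.2.2.1 c hc' i h1i hic ?_
        right; omega
    · intro c hc'
      rw [hM c]
      by_cases hr : 2 + k ≤ c ∧ c < n
      · rw [if_pos hr]
        apply max_le (hcm.2.2.2 c hc')
        apply getD_le_pymax
        rw [colS_length ed eD n c (by omega) hn]
        omega
      · rw [if_neg hr]; exact hcm.2.2.2 c hc'

theorem binv_fold (ed eD : List Int) (n : Nat) (hn : 2 ≤ n)
    (st0 : PySem.Dict (Nat × Nat) Int × List Int) (h0 : BInv ed eD n 0 st0) :
    ∀ k, 2 + k ≤ n →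
    BInv ed eD n k
      ((List.range' 2 k).foldl
        (fun st j0 => pvDiagFill ed eD n 1 j0 (st.2.getD (j0 - 2) 0) st.1 st.2) st0) := by
  intro k
  induction k with
  | zero => intro _; exact h0
  | succ q ih =>
    intro hq
    rw [List.range'_1_concat, List.foldl_append]
    simp only [List.foldl_cons, List.foldl_nil]
    exact binv_step ed eD n q hn (by omega) _ (ih (by omega))

-- initial state: row 0 filled, cell (1,1), then the main diagonal
theorem binv_init_gen (ed eD : List Int) (n : Nat) (hn : 2 ≤ n)
    (cells0 : PySem.Dict (Nat × Nat) Int) (colMax0 : List Int)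
    (hcells0 : ∀ i j, cells0.getD (i, j) 0 = if i = 0 ∧ j < n then r0v ed eD j else 0)
    (hlen0 : colMax0.length = n)
    (hcol0 : ∀ c, colMax0.getD c 0 = if c < n then max (r0v ed eD c) 0 else 0) :
    BInv ed eD n 0
      (pvDiagFill ed eD n 2 2 (min (pyget ed 1) (pyget eD 0))
        (cells0.insert (1, 1) (min (pyget ed 1) (pyget eD 0)))
        (colMax0.set 1 (max (colMax0.getD 1 0) (min (pyget ed 1) (pyget eD 0))))) := by
  have hv11 : min (pyget ed 1) (pyget eD 0) = (colS ed eD n 1).getD 1 0 :=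
    (colS_getD_one_base ed eD n).symm
  obtain ⟨hc, hl, hm'⟩ := diagFill_spec ed eD n hn (n-2) 2 2 rfl (le_refl 2) (le_refl 2)
    (min (pyget ed 1) (pyget eD 0))
    (by rw [show (2:Nat)-1 = 1 from rfl]; exact hv11)
    (cells0.insert (1, 1) (min (pyget ed 1) (pyget eD 0)))
    (colMax0.set 1 (max (colMax0.getD 1 0) (min (pyget ed 1) (pyget eD 0))))
    (by rw [List.length_set]; exact hlen0)
  have hM : ∀ c, c < n → (pvDiagFill ed eD n 2 2 (min (pyget ed 1) (pyget eD 0))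
      (cells0.insert (1, 1) (min (pyget ed 1) (pyget eD 0)))
      (colMax0.set 1 (max (colMax0.getD 1 0) (min (pyget ed 1) (pyget eD 0))))).2.getD c 0 =
      if 2 ≤ c then max (max (r0v ed eD c) 0) ((colS ed eD n c).getD c 0)
      else if c = 1 then max (max (r0v ed eD 1) 0) ((colS ed eD n 1).getD 1 0)
      else max (r0v ed eD 0) 0 := by
    intro c hcn
    rw [hm' c]
    by_cases h2 : 2 ≤ c
    · rw [if_pos (show 2 ≤ c ∧ c < n from ⟨h2, hcn⟩), getD_set_int,
          if_neg (show ¬(c = 1 ∧ 1 < colMax0.length) from by omega),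
          hcol0 c, if_pos hcn, if_pos h2,
          show 2 + (c - 2) = c from by omega]
    · rw [if_neg (show ¬(2 ≤ c ∧ c < n) from by omega), getD_set_int, if_neg h2]
      by_cases h1 : c = 1
      · subst h1
        rw [if_pos (show (1:Nat) = 1 ∧ 1 < colMax0.length from ⟨rfl, by omega⟩),
            hcol0 1, if_pos (by omega : 1 < n), if_pos rfl, hv11]
      · have h0 : c = 0 := by omega
        subst h0
        rw [if_neg (show ¬((0:Nat) = 1 ∧ 1 < colMax0.length) from by omega),
            hcol0 0, if_pos (by omega : 0 < n), if_neg h1]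
  constructor
  · intro i j
    rw [hc i j]
    by_cases hr : 2 ≤ i ∧ 2 ≤ j ∧ j < n ∧ i - 2 = j - 2
    · rw [if_pos hr,
          if_pos (show j < n ∧ (i = 0 ∨ (1 ≤ i ∧ i ≤ j ∧ j ≤ i + 0)) from by omega)]
    · rw [if_neg hr, PySem.Dict.getD_insert]
      by_cases he : (i, j) = ((1:Nat), 1)
      · rw [if_pos he]
        have hik : i = 1 ∧ j = 1 :=
          ⟨congrArg Prod.fst he, congrArg Prod.snd he⟩
        rw [if_pos (show j < n ∧ (i = 0 ∨ (1 ≤ i ∧ i ≤ j ∧ j ≤ i + 0)) from by omega),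
            hik.1, hik.2]
        exact hv11
      · rw [if_neg he, hcells0 i j]
        have he' : ¬(i = 1 ∧ j = 1) := fun h => he (by rw [h.1, h.2])
        by_cases hi0 : i = 0 ∧ j < n
        · rw [if_pos hi0,
              if_pos (show j < n ∧ (i = 0 ∨ (1 ≤ i ∧ i ≤ j ∧ j ≤ i + 0)) from ⟨hi0.2, Or.inl hi0.1⟩),
              hi0.1, colS_getD_zero]
        · rw [if_neg hi0, if_neg (show ¬(j < n ∧ (i = 0 ∨ (1 ≤ i ∧ i ≤ j ∧ j ≤ i + 0))) from by omega)]
  · refine ⟨hl, ?_, ?_, ?_⟩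
    · intro c hcn
      rw [hM c hcn]
      by_cases h2 : 2 ≤ c
      · rw [if_pos h2]; exact le_max_left _ _
      · rw [if_neg h2]
        by_cases h1 : c = 1
        · subst h1; rw [if_pos rfl]; exact le_max_left _ _
        · have h0 : c = 0 := by omega
          subst h0
          rw [if_neg h1]
    · intro c hcn i h1i hic hcase
      obtain rfl : i = c := by omega
      rw [hM i hcn]
      by_cases h2 : 2 ≤ i
      · rw [if_pos h2]; exact le_max_right _ _
      · have h1 : i = 1 := by omega
        subst h1
        rw [if_neg h2, if_pos rfl]
        exact le_max_right _ _
    · intro c hc3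
      have hcn : c < n := by omega
      have hzero_le : (0:Int) ≤ pymax (colS ed eD n c) := by
        have := getD_le_pymax (colS ed eD n c) (c+1)
          (by rw [colS_length ed eD n c hcn hn]; omega)
        rwa [colS_getD_big ed eD n (c+1) c (by omega)] at this
      have hr0_le : r0v ed eD c ≤ pymax (colS ed eD n c) := by
        have := getD_le_pymax (colS ed eD n c) 0
          (by rw [colS_length ed eD n c hcn hn]; omega)
        rwa [colS_getD_zero] at this
      have hseed_le : max (r0v ed eD c) 0 ≤ pymax (colS ed eD n c) := max_le hr0_le hzero_le
      rw [hM c hcn]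
      by_cases h2 : 2 ≤ c
      · rw [if_pos h2]
        exact max_le hseed_le (getD_le_pymax _ c (by rw [colS_length ed eD n c hcn hn]; omega))
      · rw [if_neg h2]
        by_cases h1 : c = 1
        · subst h1
          rw [if_pos rfl]
          exact max_le hseed_le (getD_le_pymax _ 1 (by rw [colS_length ed eD n 1 hcn hn]; omega))
        · have h0 : c = 0 := by omega
          subst h0
          rw [if_neg h1]
          exact hseed_le

theorem b_total (ed eD : List Int) (hlen : ed.length = eD.length) (hn : 2 ≤ ed.length) :
    obtener_matriz_optima_alt ed eD
    = matOf ed.length (fun i j => (colS ed eD ed.length j).getD i 0) := by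
  simp only [obtener_matriz_optima_alt]
  have hcells0 : ∀ i j, (((ed.zip eD).zipIdx).foldl
      (fun (p : PySem.Dict (Nat × Nat) Int × Int) x =>
        (p.1.insert (0, x.2) (p.2 + min x.1.1 x.1.2), p.2 + min x.1.1 x.1.2))
      (PySem.Dict.empty, 0)).1.getD (i, j) 0 =
      if i = 0 ∧ j < ed.length then r0v ed eD j else 0 := by
    intro i j
    have hzlen : (ed.zip eD).length = ed.length := by
      simp [List.length_zip]; omega
    rw [row0_fold (ed.zip eD) 0 PySem.Dict.empty 0 i j]
    by_cases h : i = 0 ∧ j < ed.length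
    · rw [if_pos (show i = 0 ∧ 0 ≤ j ∧ j < 0 + (ed.zip eD).length from by rw [hzlen]; omega),
          if_pos h, Nat.sub_zero, zr_eq_r0v ed eD hlen j h.2]
      ring
    · rw [if_neg (show ¬(i = 0 ∧ 0 ≤ j ∧ j < 0 + (ed.zip eD).length) from by rw [hzlen]; omega),
          if_neg h, PySem.Dict.getD_empty]
  have hlen0 : ((List.range ed.length).map (fun j =>
      max ((((ed.zip eD).zipIdx).foldl
        (fun (p : PySem.Dict (Nat × Nat) Int × Int) x =>
          (p.1.insert (0, x.2) (p.2 + min x.1.1 x.1.2), p.2 + min x.1.1 x.1.2))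
        (PySem.Dict.empty, 0)).1.getD (0, j) 0) 0)).length = ed.length := by
    simp
  have hcol0 : ∀ c, ((List.range ed.length).map (fun j =>
      max ((((ed.zip eD).zipIdx).foldl
        (fun (p : PySem.Dict (Nat × Nat) Int × Int) x =>
          (p.1.insert (0, x.2) (p.2 + min x.1.1 x.1.2), p.2 + min x.1.1 x.1.2))
        (PySem.Dict.empty, 0)).1.getD (0, j) 0) 0)).getD c 0 =
      if c < ed.length then max (r0v ed eD c) 0 else 0 := by
    intro c
    rw [getD_map_range]
    by_cases h : c < ed.length
    · rw [if_pos h, if_pos h, hcells0 0 c, if_pos ⟨rfl, h⟩]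
    · rw [if_neg h, if_neg h]
  have hinv := binv_fold ed eD ed.length hn _
    (binv_init_gen ed eD ed.length hn _ _ hcells0 hlen0 hcol0) (ed.length - 2) (by omega)
  unfold matOf
  refine List.map_congr_left ?_
  intro i hi
  refine List.map_congr_left ?_
  intro j hj
  have hjn : j < ed.length := List.mem_range.mp hj
  rw [hinv.1 i j]
  by_cases hij : i ≤ j
  · rw [if_pos (show j < ed.length ∧
        (i = 0 ∨ (1 ≤ i ∧ i ≤ j ∧ j ≤ i + (ed.length - 2))) from by omega)]
  · rw [if_neg (by omega)]
    show (0:Int) = (colS ed eD ed.length j).getD i 0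
    rw [colS_getD_big ed eD ed.length i j (by omega)]

-- ---- A side ----

theorem replicate_matOf (n : Nat) :
    List.replicate n (List.replicate n (0:Int)) = matOf n (fun _ _ => 0) := by
  unfold matOf
  apply List.ext_getElem
  · simp
  · intro k hk hk'
    simp

theorem a_base (ed eD : List Int) (n : Nat) (hn : 2 ≤ n) :
    mset (mset (List.replicate n (List.replicate n (0:Int)))
        0 0 (min (pyget ed 0) (pyget eD 0)))
        1 1 (min (pyget ed 1) (pyget eD 0))
    = matOf n (entRow ed eD 0) := by
  rw [replicate_matOf,
      mset_matOf n _ 0 0 _ (by omega) (by omega),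
      mset_matOf n _ 1 1 _ (by omega) (by omega)]
  apply matCongr
  intro i _ j _
  simp only [entRow]
  by_cases h11 : i = 1 ∧ j = 1
  · rw [if_pos h11, if_neg (by omega), if_pos h11]
  · rw [if_neg h11]
    by_cases h00 : i = 0 ∧ j = 0
    · rw [if_pos h00, if_pos ⟨h00.1, by omega⟩]
      obtain ⟨rfl, rfl⟩ := h00
      rfl
    · rw [if_neg h00, if_neg (by omega), if_neg h11]

theorem a_row_loop (ed eD : List Int) (n : Nat) (hn : 2 ≤ n) (k : Nat) (hk : k ≤ n - 1) :
    (List.range' 1 k).foldl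
      (fun m i => mset m 0 i (mget m 0 (i-1) + min (pyget ed i) (pyget eD i)))
      (matOf n (entRow ed eD 0))
    = matOf n (entRow ed eD k) := by
  induction k with
  | zero => rfl
  | succ q ih =>
    rw [List.range'_1_concat, List.foldl_append, ih (by omega)]
    simp only [List.foldl_cons, List.foldl_nil]
    rw [mget_matOf n _ 0 (1+q-1) (by omega) (by omega),
        show entRow ed eD q 0 (1+q-1) = r0v ed eD q from by
          simp only [entRow]
          rw [if_pos (show True ∧ 1+q-1 ≤ q from ⟨trivial, by omega⟩),
              show (1+q:Nat)-1 = q from by omega],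
        mset_matOf n _ 0 (1+q) _ (by omega) (by omega)]
    apply matCongr
    intro i hi j hj
    simp only [entRow]
    by_cases hij : i = 0 ∧ j = 1 + q
    · rw [if_pos hij, if_pos ⟨hij.1, by omega⟩]
      obtain ⟨rfl, rfl⟩ := hij
      rw [show (1+q:Nat) = q+1 from by omega]
      rfl
    · rw [if_neg hij]
      by_cases hi0 : i = 0 ∧ j ≤ q
      · rw [if_pos hi0, if_pos (show i = 0 ∧ j ≤ q+1 from ⟨hi0.1, by omega⟩)]
      · rw [if_neg hi0, if_neg (show ¬(i = 0 ∧ j ≤ q+1) from by omega)]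

theorem a_after_row (ed eD : List Int) (n : Nat) (hn : 2 ≤ n) :
    matOf n (entRow ed eD (n-1)) = matOf n (entA ed eD n 1) := by
  apply matCongr
  intro i hi j hj
  simp only [entRow, entA]
  by_cases hj1 : j ≤ 1
  · rw [if_pos hj1]
    interval_cases j
    · match i with
      | 0 => rw [if_pos (show (0:Nat) = 0 ∧ (0:Nat) ≤ n-1 from ⟨rfl, by omega⟩), colS_getD_zero]
      | i+1 => rw [if_neg (show ¬((i+1:Nat) = 0 ∧ (0:Nat) ≤ n-1) from by omega),
                   if_neg (show ¬((i+1:Nat) = 1 ∧ (0:Nat) = 1) from by omega),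
                   colS_getD_big _ _ _ _ _ (by omega)]
    · match i with
      | 0 => rw [if_pos (show (0:Nat) = 0 ∧ (1:Nat) ≤ n-1 from ⟨rfl, by omega⟩), colS_getD_zero]
      | 1 => rw [if_neg (show ¬((1:Nat) = 0 ∧ (1:Nat) ≤ n-1) from by omega),
                 if_pos (show (1:Nat) = 1 ∧ (1:Nat) = 1 from ⟨rfl, rfl⟩), colS_getD_one_base]
      | i+2 => rw [if_neg (show ¬((i+2:Nat) = 0 ∧ (1:Nat) ≤ n-1) from by omega),
                   if_neg (show ¬((i+2:Nat) = 1 ∧ (1:Nat) = 1) from by omega),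
                   colS_getD_big _ _ _ _ _ (by omega)]
  · rw [if_neg hj1]
    by_cases hi0 : i = 0
    · subst hi0
      rw [if_pos (show (0:Nat) = 0 ∧ j ≤ n-1 from ⟨rfl, by omega⟩), if_pos rfl]
    · rw [if_neg (show ¬(i = 0 ∧ j ≤ n-1) from fun h => hi0 h.1),
          if_neg (show ¬(i = 1 ∧ j = 1) from by omega), if_neg hi0]

theorem a_inner (ed eD : List Int) (n K : Nat) (hn : 2 ≤ n) (hJn : K + 2 < n)
    (t : Nat) (ht : t ≤ K + 2) :
    (List.range' 1 t).foldl
      (fun m i => if i = 1 then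
          mset m i (K+2) (min (pyget eD (i-1)) (pyget ed (K+2)) + pymax (obtener_columna m (K+2-2)))
        else
          mset m i (K+2) (min (pyget eD (i-1)) (pyget ed (K+2)) + mget m (i-1) (K+2-1)))
      (matOf n (entA ed eD n (K+2-1)))
    = matOf n (entI ed eD n (K+2) t) := by
  induction t with
  | zero =>
    apply matCongr
    intro i _ j _
    simp only [entI]
    rw [if_neg (by omega), show (K+2:Nat)-1 = K+1 from by omega]
  | succ q ih =>
    rw [List.range'_1_concat, List.foldl_append, ih (by omega)]
    simp only [List.foldl_cons, List.foldl_nil]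
    match q with
    | 0 =>
      rw [if_pos rfl]
      have hcolumna : obtener_columna (matOf n (entI ed eD n (K+2) 0)) (K+2-2) = colS ed eD n K := by
        rw [columna_matOf, show (K+2:Nat)-2 = K from by omega]
        have hpt : ∀ i ∈ List.range n,
            ((List.range n).map (entI ed eD n (K+2) 0 i)).getD K 0 = (colS ed eD n K).getD i 0 := by
          intro i _
          rw [getD_map_range, if_pos (by omega)]
          simp only [entI]
          rw [if_neg (show ¬(K = K+2 ∧ 1 ≤ i ∧ i ≤ 0) from by omega), entA,
              if_pos (show K ≤ K+2-1 by omega)]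
        rw [List.map_congr_left hpt]
        exact eq_map_range_getD _ _ (colS_length ed eD n K (by omega) hn)
      rw [hcolumna,
          mset_matOf n _ 1 (K+2) _ (by omega) (by omega)]
      apply matCongr
      intro i _ j _
      simp only [entI]
      by_cases hij : i = 1 ∧ j = K+2
      · rw [if_pos hij, if_pos (show j = K+2 ∧ 1 ≤ i ∧ i ≤ 1 from by omega)]
        obtain ⟨rfl, rfl⟩ := hij
        rw [colS_getD_one]
      · rw [if_neg hij, if_neg (show ¬(j = K+2 ∧ 1 ≤ i ∧ i ≤ 0) from by omega),
            if_neg (show ¬(j = K+2 ∧ 1 ≤ i ∧ i ≤ 1) from by omega)]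
    | q+1 =>
      rw [if_neg (show ¬(1+(q+1) = 1) from by omega),
          mget_matOf n _ (1+(q+1)-1) (K+2-1) (by omega) (by omega),
          mset_matOf n _ (1+(q+1)) (K+2) _ (by omega) (by omega)]
      have hval : entI ed eD n (K+2) (q+1) (1+(q+1)-1) (K+2-1)
          = (colS ed eD n (K+1)).getD (q+1) 0 := by
        simp only [entI]
        rw [if_neg (show ¬(K+2-1 = K+2 ∧ 1 ≤ 1+(q+1)-1 ∧ 1+(q+1)-1 ≤ q+1) from by omega), entA,
            show (K+2:Nat)-1 = K+1 from by omega, if_pos (le_refl _),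
            show (1+(q+1):Nat)-1 = q+1 from by omega]
      rw [hval]
      apply matCongr
      intro i _ j _
      simp only [entI]
      by_cases hij : i = 1+(q+1) ∧ j = K+2
      · rw [if_pos hij, if_pos (show j = K+2 ∧ 1 ≤ i ∧ i ≤ q+1+1 from by omega)]
        obtain ⟨rfl, rfl⟩ := hij
        rw [show (1+(q+1):Nat) = q+2 from by omega,
            colS_getD_mid ed eD n (q+2) K (by omega) (by omega)]
        unfold pyget
        rw [show (q+2-1 : Nat) = q+1 from by omega]
      · rw [if_neg hij]
        by_cases hij2 : j = K+2 ∧ 1 ≤ i ∧ i ≤ q+1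
        · rw [if_pos hij2, if_pos (show j = K+2 ∧ 1 ≤ i ∧ i ≤ q+1+1 from by omega)]
        · rw [if_neg hij2, if_neg (show ¬(j = K+2 ∧ 1 ≤ i ∧ i ≤ q+1+1) from by omega)]

theorem entI_final (ed eD : List Int) (n J : Nat) (_hn : 2 ≤ n) (hJ2 : 2 ≤ J) (hJn : J < n) :
    matOf n (entI ed eD n J J) = matOf n (entA ed eD n J) := by
  apply matCongr
  intro i hi j hj
  simp only [entI, entA]
  by_cases hjJ : j = J
  · subst hjJ
    by_cases hi1 : 1 ≤ i ∧ i ≤ j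
    · rw [if_pos ⟨rfl, hi1.1, hi1.2⟩, if_pos (le_refl j)]
    · rw [if_neg (show ¬(j = j ∧ 1 ≤ i ∧ i ≤ j) from fun h => hi1 ⟨h.2.1, h.2.2⟩),
          if_neg (show ¬(j ≤ j-1) from by omega), if_pos (le_refl j)]
      match i with
      | 0 => rw [if_pos rfl, colS_getD_zero]
      | i+1 =>
        rw [if_neg (by omega), colS_getD_big _ _ _ _ _ (by omega)]
  · rw [if_neg (show ¬(j = J ∧ 1 ≤ i ∧ i ≤ J) from fun h => hjJ h.1)]
    by_cases hjlt : j < J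
    · rw [if_pos (show j ≤ J-1 from by omega), if_pos (show j ≤ J from by omega)]
    · rw [if_neg (show ¬(j ≤ J-1) from by omega), if_neg (show ¬(j ≤ J) from by omega)]

theorem a_outer (ed eD : List Int) (n : Nat) (hn : 2 ≤ n) (k : Nat) (hk : 2 + k ≤ n) :
    (List.range' 2 k).foldl
      (fun m j => (List.range' 1 j).foldl
        (fun m i => if i = 1 then
            mset m i j (min (pyget eD (i-1)) (pyget ed j) + pymax (obtener_columna m (j-2)))
          else
            mset m i j (min (pyget eD (i-1)) (pyget ed j) + mget m (i-1) (j-1))) m)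
      (matOf n (entA ed eD n 1))
    = matOf n (entA ed eD n (1+k)) := by
  induction k with
  | zero => rfl
  | succ q ih =>
    rw [List.range'_1_concat, List.foldl_append, ih (by omega)]
    simp only [List.foldl_cons, List.foldl_nil]
    rw [show matOf n (entA ed eD n (1+q)) = matOf n (entA ed eD n (2+q-1)) from by
          rw [show (2+q:Nat)-1 = 1+q from by omega],
        show (2+q:Nat) = q+2 from by omega,
        a_inner ed eD n q hn (by omega) (q+2) (le_refl _),
        entI_final ed eD n (q+2) hn (by omega) (by omega),
        show (q+2:Nat) = 1+(q+1) from by omega]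

theorem a_total (ed eD : List Int) (hlen : eD.length = ed.length) (hn : 2 ≤ ed.length) :
    obtener_matriz_optima ed eD
    = matOf ed.length (entA ed eD ed.length (ed.length - 1)) := by
  simp only [obtener_matriz_optima]
  rw [hlen, a_base ed eD ed.length hn,
      matOf_getD ed.length _ 0 (by omega)]
  simp only [List.length_map, List.length_range]
  rw [a_row_loop ed eD ed.length hn (ed.length - 1) (le_refl _),
      a_after_row ed eD ed.length hn,
      matOf_length,
      a_outer ed eD ed.length hn (ed.length - 2) (by omega),
      show 1+(ed.length-2) = ed.length - 1 from by omega]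

-- ===== VERDICT (by name: the statement is the Claim_ definition above) =====
theorem obtener_matriz_optima_spec : Claim_equal_obtener_matriz_optima := by
  intro ed eD _hdom hpre
  obtain ⟨hlen, hn⟩ := hpre
  unfold Spec_obtener_matriz_optima
  rw [a_total ed eD hlen.symm hn, b_total ed eD hlen hn]
  apply matCongr
  intro i hi j hj
  simp only [entA]
  rw [if_pos (show j ≤ ed.length - 1 from by omega)]
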